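-- pv_equiv track=rewrite | github.com/EliFrun/my-leetcode-submissions | submissions/2690-house-robber-iv/solution.py | minCapability
-- ===== SOURCE A (Python) =====
-- from typing import List
--
-- def minCapability(nums: List[int], k: int) -> int:
--     vals = sorted(list(set(nums)))
--     def solve(m):
--         memo = [0] * (len(nums) + 2)
--         for i in range(len(nums) - 1, -1, -1):
--             memo[i] = max((1 if nums[i] <= m else 0) + memo[i + 2], memo[i + 1])
--         return memo[0] >= k
--
--     left, right = 0, len(vals) - 1
--     while right - left > 1:
--         middle = (left + right) // 2
--         if solve(vals[middle]):
--             right = middle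
--         else:
--             left = middle
--
--     if solve(vals[left]):
--         return vals[left]
--     return vals[right]
-- ===== SOURCE B (Python) =====
-- def minCapability(nums, k):
--     def feasible(m):
--         count = 0
--         i = 0
--         while i < len(nums):
--             if nums[i] <= m:
--                 count += 1
--                 i += 2
--             else:
--                 i += 1
--         return count >= k
--
--     lo, hi = min(nums), max(nums)
--     while lo < hi:
--         mid = (lo + hi) // 2
--         if feasible(mid):
--             hi = mid
--         else:
--             lo = mid + 1
--     return lo
-- ===== Notes on version B (the rewrite author's own statement) =====
-- stated objective: faster
-- what changed: Replaces the O(n)-per-probe DP feasibility check (memo table filled right-to-left) with a greedy take-and-skip linear count, and binary-searches the integer range [min(nums), max(nums)] directly instead of sorting the distinct values and bisecting indices, so the sort and the per-probe list allocation disappear.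
import Mathlib
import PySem

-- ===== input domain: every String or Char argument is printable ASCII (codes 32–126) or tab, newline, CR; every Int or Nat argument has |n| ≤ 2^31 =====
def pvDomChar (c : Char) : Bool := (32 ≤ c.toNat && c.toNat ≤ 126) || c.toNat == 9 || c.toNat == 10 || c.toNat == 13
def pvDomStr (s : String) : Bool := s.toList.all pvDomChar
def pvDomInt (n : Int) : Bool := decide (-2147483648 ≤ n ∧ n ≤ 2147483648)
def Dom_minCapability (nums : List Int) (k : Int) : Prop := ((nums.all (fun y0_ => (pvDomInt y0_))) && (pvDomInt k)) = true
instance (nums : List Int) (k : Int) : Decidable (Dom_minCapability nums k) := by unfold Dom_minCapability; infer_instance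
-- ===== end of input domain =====

-- B keeps the binary-search-on-capability shape but swaps the DP feasibility table for a
-- greedy take-and-skip count and bisects the integer range [min, max] instead of sorted(set(nums)).


-- ===== PORT A =====
-- solve(m): memo = [0]*(n+2); for i in range(n-1,-1,-1): memo[i] = max((1 if nums[i]<=m else 0)+memo[i+2], memo[i+1]); return memo[0] >= k
-- (indices produced by the loop are always in range, so the total forms pySetD/pyGetD are exact here)
def solveA (nums : List Int) (k : Int) (m : Int) : Bool :=
  let memo : List Int := List.replicate (nums.length + 2) 0
  let memo := (PySem.List.pyRange ((nums.length : Int) - 1) (-1) (-1)).foldl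
    (fun memo i =>
      PySem.List.pySetD memo i
        (max ((if PySem.List.pyGetD nums i 0 ≤ m then (1 : Int) else 0) + PySem.List.pyGetD memo (i + 2) 0)
             (PySem.List.pyGetD memo (i + 1) 0))) memo
  decide (PySem.List.pyGetD memo 0 0 ≥ k)

-- while right - left > 1: middle = (left+right)//2; if solve(vals[middle]): right = middle else: left = middle
def aLoop (nums : List Int) (k : Int) (vals : List Int) (left right : Int) : Int × Int :=
  if h : right - left > 1 then
    let middle := PySem.Int.floordiv (left + right) 2
    if solveA nums k (PySem.List.pyGetD vals middle 0) then
      aLoop nums k vals left middle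
    else
      aLoop nums k vals middle right
  else (left, right)
termination_by (right - left).toNat
decreasing_by
  all_goals
    rw [PySem.Int.floordiv_eq_ediv_of_pos (by omega : (0:Int) < 2)]
    omega

def minCapability (nums : List Int) (k : Int) : Int :=
  let vals := PySem.List.sorted (PySem.Set.ofList nums) (fun x => x) false
  let lr := aLoop nums k vals 0 ((vals.length : Int) - 1)
  if solveA nums k (PySem.List.pyGetD vals lr.1 0) then PySem.List.pyGetD vals lr.1 0
  else PySem.List.pyGetD vals lr.2 0

-- ===== PORT B =====
-- feasible(m): greedy scan — count = 0; i = 0; while i < len(nums): if nums[i] <= m: count += 1; i += 2 else: i += 1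
def feasLoop (nums : List Int) (m : Int) (i : Nat) (count : Int) : Int :=
  if h : i < nums.length then
    if nums[i] ≤ m then feasLoop nums m (i + 2) (count + 1)
    else feasLoop nums m (i + 1) count
  else count
termination_by nums.length - i

def feasibleB (nums : List Int) (k m : Int) : Bool := decide (feasLoop nums m 0 0 ≥ k)

-- while lo < hi: mid = (lo+hi)//2; if feasible(mid): hi = mid else: lo = mid+1
def bLoop (nums : List Int) (k lo hi : Int) : Int :=
  if h : lo < hi then
    let mid := PySem.Int.floordiv (lo + hi) 2
    if feasibleB nums k mid then bLoop nums k lo mid else bLoop nums k (mid + 1) hi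
  else lo
termination_by (hi - lo).toNat
decreasing_by
  all_goals
    rw [PySem.Int.floordiv_eq_ediv_of_pos (by omega : (0:Int) < 2)]
    omega

def minCapability_alt (nums : List Int) (k : Int) : Int :=
  match PySem.List.min? nums (fun x => x), PySem.List.max? nums (fun x => x) with
  | some lo, some hi => bLoop nums k lo hi
  | _, _ => 0  -- unreachable under Pre_: Python's min/max raise ValueError on []

-- ===== PRECONDITION & SPEC =====
-- Pre_ excludes only the empty list, on which A raises IndexError (vals[left] of an empty vals)
-- and B raises ValueError (min of an empty sequence).
def Pre_minCapability (nums : List Int) (k : Int) : Prop := nums ≠ []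
instance (nums : List Int) (k : Int) : Decidable (Pre_minCapability nums k) := by
  unfold Pre_minCapability; infer_instance

def pvWitness_minCapability : List Int × Int := ([2, 3, 5, 9], 2)

def Spec_minCapability (nums : List Int) (k : Int) (out : Int) : Prop := out = minCapability_alt nums k
instance (nums : List Int) (k : Int) (out : Int) : Decidable (Spec_minCapability nums k out) := by
  unfold Spec_minCapability; infer_instance

-- ===== CLAIM (what is proved, stated in full; the proofs are below) =====
def Claim_equal_minCapability : Prop := ∀ (nums : List Int) (k : Int), Dom_minCapability nums k → Pre_minCapability nums k → Spec_minCapability nums k (minCapability nums k)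

-- ===== LEMMAS AND PROOFS =====

-- the greedy count from position i (feasLoop without its accumulator)
def gCnt (nums : List Int) (m : Int) (i : Nat) : Int :=
  if h : i < nums.length then
    if nums[i] ≤ m then 1 + gCnt nums m (i + 2) else gCnt nums m (i + 1)
  else 0
termination_by nums.length - i

-- the DP table value memo[i] of A's solve
def dpA (nums : List Int) (m : Int) (i : Nat) : Int :=
  if h : i < nums.length then
    max ((if nums.getD i 0 ≤ m then (1 : Int) else 0) + dpA nums m (i + 2)) (dpA nums m (i + 1))
  else 0
termination_by nums.length - i

theorem gCnt_nonneg (nums : List Int) (m : Int) (i : Nat) : 0 ≤ gCnt nums m i := by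
  unfold gCnt
  split
  · split
    · have := gCnt_nonneg nums m (i + 2); linarith
    · exact gCnt_nonneg nums m (i + 1)
  · exact le_refl _
termination_by nums.length - i
decreasing_by all_goals omega

theorem gCnt_anti (nums : List Int) (m : Int) (i : Nat) :
    gCnt nums m (i + 1) ≤ gCnt nums m i := by
  conv_rhs => rw [gCnt]
  split
  · rename_i hi
    split
    · -- take at i: show gCnt (i+1) ≤ 1 + gCnt (i+2)
      rw [gCnt]
      split
      · split
        · have := gCnt_anti nums m (i + 2); linarith
        · have := gCnt_nonneg nums m (i + 2); linarith
      · have := gCnt_nonneg nums m (i + 2); linarith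
    · exact le_refl _
  · rename_i hi
    rw [gCnt]
    rw [dif_neg (by omega)]
termination_by nums.length - i
decreasing_by all_goals omega

theorem gCnt_succ_le (nums : List Int) (m : Int) (i : Nat) :
    gCnt nums m (i + 1) ≤ 1 + gCnt nums m (i + 2) := by
  rw [gCnt]
  split
  · split
    · have := gCnt_anti nums m (i + 2); linarith
    · linarith
  · have := gCnt_nonneg nums m (i + 2); linarith

theorem dpA_eq_gCnt (nums : List Int) (m : Int) (i : Nat) :
    dpA nums m i = gCnt nums m i := by
  rw [dpA]
  conv_rhs => rw [gCnt]
  split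
  · rename_i hi
    rw [List.getD_eq_getElem _ _ hi]
    rw [dpA_eq_gCnt nums m (i + 2), dpA_eq_gCnt nums m (i + 1)]
    split
    · have := gCnt_succ_le nums m i
      omega
    · have : gCnt nums m (i + 2) ≤ gCnt nums m (i + 1) := gCnt_anti nums m (i + 1)
      omega
  · rfl
termination_by nums.length - i
decreasing_by all_goals omega

theorem gCnt_mono (nums : List Int) {m m' : Int} (h : m ≤ m') (i : Nat) :
    gCnt nums m i ≤ gCnt nums m' i := by
  rw [gCnt]
  conv_rhs => rw [gCnt]
  split
  · rename_i hi
    split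
    · rename_i hm
      rw [if_pos (le_trans hm h)]
      have := gCnt_mono nums h (i + 2); linarith
    · split
      · have h1 := gCnt_mono nums h (i + 1)
        have h2 := gCnt_succ_le nums m' i
        linarith
      · exact gCnt_mono nums h (i + 1)
  · exact le_refl _
termination_by nums.length - i
decreasing_by all_goals omega

theorem gCnt_congr (nums : List Int) {m m' : Int}
    (h : ∀ x ∈ nums, (x ≤ m ↔ x ≤ m')) (i : Nat) :
    gCnt nums m i = gCnt nums m' i := by
  rw [gCnt]
  conv_rhs => rw [gCnt]
  split
  · rename_i hi
    have hx := h nums[i] (List.getElem_mem hi)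
    split
    · rename_i hm
      rw [if_pos (hx.mp hm)]
      rw [gCnt_congr nums h (i + 2)]
    · rename_i hm
      rw [if_neg (fun hc => hm (hx.mpr hc))]
      exact gCnt_congr nums h (i + 1)
  · rfl
termination_by nums.length - i
decreasing_by all_goals omega

-- A's memo-filling fold computes the DP table dpA
theorem fold_memo_inv (nums : List Int) (m : Int) :
    ∀ (t : Nat), t ≤ nums.length → ∀ (memo : List Int), memo.length = nums.length + 2 →
      (∀ j : Nat, t ≤ j → memo.getD j 0 = dpA nums m j) →
      ((PySem.List.pyRange ((t : Int) - 1) (-1) (-1)).foldl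
        (fun memo i =>
          PySem.List.pySetD memo i
            (max ((if PySem.List.pyGetD nums i 0 ≤ m then (1 : Int) else 0) + PySem.List.pyGetD memo (i + 2) 0)
                 (PySem.List.pyGetD memo (i + 1) 0))) memo).getD 0 0 = dpA nums m 0 := by
  intro t
  induction t with
  | zero =>
      intro _ memo hlen hinv
      rw [PySem.List.pyRange_neg_one_eq_nil (by omega)]
      simpa using hinv 0 (le_refl 0)
  | succ t ih =>
      intro ht memo hlen hinv
      have hc : ((t + 1 : Nat) : Int) - 1 = (t : Int) := by push_cast; ring
      rw [hc, PySem.List.pyRange_neg_one_cons (by omega : (-1 : Int) < (t : Int)), List.foldl_cons]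
      have htlt : t < nums.length := by omega
      have hcast2 : ((t : Int) + 2) = ((t + 2 : Nat) : Int) := by push_cast; ring
      have hcast1 : ((t : Int) + 1) = ((t + 1 : Nat) : Int) := by push_cast; ring
      have hval :
          PySem.List.pySetD memo (t : Int)
            (max ((if PySem.List.pyGetD nums (t : Int) 0 ≤ m then (1 : Int) else 0) + PySem.List.pyGetD memo ((t : Int) + 2) 0)
                 (PySem.List.pyGetD memo ((t : Int) + 1) 0)) = memo.set t (dpA nums m t) := by
        rw [hcast2, hcast1]
        simp only [PySem.List.pySetD_natCast, PySem.List.pyGetD_natCast]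
        congr 1
        rw [hinv (t + 2) (by omega), hinv (t + 1) (by omega)]
        conv_rhs => rw [dpA]
        rw [dif_pos htlt]
      rw [hval]
      apply ih (by omega)
      · simpa using hlen
      · intro j hj
        rcases Nat.eq_or_lt_of_le hj with hj' | hj'
        · subst hj'
          rw [List.getD_eq_getElem?_getD, List.getElem?_set_self (by omega)]
          simp
        · rw [List.getD_eq_getElem?_getD, List.getElem?_set_ne (by omega),
            ← List.getD_eq_getElem?_getD]
          exact hinv j (by omega)

theorem solveA_eq (nums : List Int) (k m : Int) :
    solveA nums k m = decide (k ≤ gCnt nums m 0) := by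
  have hinv : ∀ j : Nat, nums.length ≤ j →
      (List.replicate (nums.length + 2) (0 : Int)).getD j 0 = dpA nums m j := by
    intro j hj
    rw [dpA, dif_neg (by omega)]
    rcases Nat.lt_or_ge j (nums.length + 2) with h | h
    · simp [List.getD_eq_getElem?_getD, h]
    · simp [List.getD_eq_getElem?_getD, Nat.not_lt.mpr h]
  have h := fold_memo_inv nums m nums.length (le_refl _)
    (List.replicate (nums.length + 2) 0) (by simp) hinv
  simp only [solveA, PySem.List.pyGetD_zero]
  rw [h, dpA_eq_gCnt]

theorem feasLoop_eq (nums : List Int) (m : Int) (i : Nat) (c : Int) :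
    feasLoop nums m i c = c + gCnt nums m i := by
  rw [feasLoop]
  conv_rhs => rw [gCnt]
  split
  · split
    · rw [feasLoop_eq nums m (i + 2) (c + 1)]; ring
    · rw [feasLoop_eq nums m (i + 1) c]
  · ring
termination_by nums.length - i
decreasing_by all_goals omega

theorem feasibleB_eq (nums : List Int) (k m : Int) :
    feasibleB nums k m = decide (k ≤ gCnt nums m 0) := by
  unfold feasibleB
  rw [feasLoop_eq]
  simp [ge_iff_le]

-- B's binary search: result r satisfies lo ≤ r ≤ hi, everything below r is infeasible,
-- and r is feasible unless r = hi.
theorem bLoop_spec (nums : List Int) (k : Int) :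
    ∀ (lo hi : Int), lo ≤ hi →
      lo ≤ bLoop nums k lo hi ∧ bLoop nums k lo hi ≤ hi ∧
      (∀ x, lo ≤ x → x < bLoop nums k lo hi → ¬ (k ≤ gCnt nums x 0)) ∧
      (k ≤ gCnt nums (bLoop nums k lo hi) 0 ∨ bLoop nums k lo hi = hi) := by
  intro lo hi hle
  rw [bLoop]
  split
  · rename_i hlt
    dsimp only
    have hmid : lo ≤ PySem.Int.floordiv (lo + hi) 2 ∧ PySem.Int.floordiv (lo + hi) 2 < hi := by
      rw [PySem.Int.floordiv_eq_ediv_of_pos (by omega : (0:Int) < 2)]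
      omega
    set mid := PySem.Int.floordiv (lo + hi) 2 with hm
    rcases hf : feasibleB nums k mid with hf0 | hf1
    · -- infeasible at mid: recurse on [mid+1, hi]
      simp only [Bool.false_eq_true, if_false]
      obtain ⟨h1, h2, h3, h4⟩ := bLoop_spec nums k (mid + 1) hi (by omega)
      have hnf : ¬ (k ≤ gCnt nums mid 0) := by
        have := feasibleB_eq nums k mid
        rw [hf] at this
        simpa using this.symm
      refine ⟨by omega, h2, ?_, h4⟩
      intro x hx1 hx2
      by_cases hxm : x ≤ mid
      · intro hkx
        exact hnf (le_trans hkx (gCnt_mono nums hxm 0))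
      · exact h3 x (by omega) hx2
    · -- feasible at mid: recurse on [lo, mid]
      simp only [reduceIte]
      obtain ⟨h1, h2, h3, h4⟩ := bLoop_spec nums k lo mid (by omega)
      have hfm : k ≤ gCnt nums mid 0 := by
        have := feasibleB_eq nums k mid
        rw [hf] at this
        simpa using this.symm
      refine ⟨h1, by omega, h3, ?_⟩
      left
      rcases h4 with h | h
      · exact h
      · rw [h]; exact hfm
  · exact ⟨le_refl _, hle, fun x h1 h2 => absurd (lt_of_le_of_lt h1 h2) (lt_irrefl _), Or.inr (by omega)⟩
termination_by lo hi => (hi - lo).toNat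
decreasing_by
  all_goals
    rw [PySem.Int.floordiv_eq_ediv_of_pos (by omega : (0:Int) < 2)] at hm
    omega

-- A's bisection loop invariant.
theorem aLoop_spec (nums : List Int) (k : Int) (vals : List Int) :
    ∀ (l r : Int), l ≤ r →
      l ≤ (aLoop nums k vals l r).1 ∧ (aLoop nums k vals l r).1 ≤ (aLoop nums k vals l r).2 ∧
      (aLoop nums k vals l r).2 ≤ r ∧ (aLoop nums k vals l r).2 - (aLoop nums k vals l r).1 ≤ 1 ∧
      ((aLoop nums k vals l r).1 = l ∨ solveA nums k (PySem.List.pyGetD vals (aLoop nums k vals l r).1 0) = false) ∧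
      ((aLoop nums k vals l r).2 = r ∨ solveA nums k (PySem.List.pyGetD vals (aLoop nums k vals l r).2 0) = true) := by
  intro l r hle
  rw [aLoop]
  split
  · rename_i hlt
    dsimp only
    have hmid : l < PySem.Int.floordiv (l + r) 2 ∧ PySem.Int.floordiv (l + r) 2 < r := by
      rw [PySem.Int.floordiv_eq_ediv_of_pos (by omega : (0:Int) < 2)]
      omega
    set mid := PySem.Int.floordiv (l + r) 2 with hm
    rcases hf : solveA nums k (PySem.List.pyGetD vals mid 0) with hf0 | hf1
    · simp only [Bool.false_eq_true, if_false]
      obtain ⟨h1, h2, h3, h4, h5, h6⟩ := aLoop_spec nums k vals mid r (by omega)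
      refine ⟨by omega, h2, h3, h4, ?_, h6⟩
      rcases h5 with h | h
      · right; rw [h]; exact hf
      · right; exact h
    · simp only [reduceIte]
      obtain ⟨h1, h2, h3, h4, h5, h6⟩ := aLoop_spec nums k vals l mid (by omega)
      refine ⟨h1, h2, by omega, h4, h5, ?_⟩
      rcases h6 with h | h
      · right; rw [h]; exact hf
      · right; exact h
  · exact ⟨le_refl _, hle, le_refl _, by omega, Or.inl rfl, Or.inl rfl⟩
termination_by l r => (r - l).toNat
decreasing_by
  all_goals
    rw [PySem.Int.floordiv_eq_ediv_of_pos (by omega : (0:Int) < 2)] at hm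
    omega

-- the answer both programs compute is characterised by this triple, which is unique
theorem feas_unique (nums : List Int) (k a b : Int)
    (ha : a ∈ nums ∧ k ≤ gCnt nums a 0 ∧ ∀ v ∈ nums, v < a → ¬ k ≤ gCnt nums v 0)
    (hb : b ∈ nums ∧ k ≤ gCnt nums b 0 ∧ ∀ v ∈ nums, v < b → ¬ k ≤ gCnt nums v 0) :
    a = b := by
  rcases lt_trichotomy a b with h | h | h
  · exact absurd ha.2.1 (hb.2.2 a ha.1 h)
  · exact h
  · exact absurd hb.2.1 (ha.2.2 b hb.1 h)

-- the largest element of nums not exceeding r is as feasible as r itself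
theorem feas_elem_of_feas (nums : List Int) (k r v : Int) (hv : v ∈ nums) (hvr : v ≤ r)
    (hF : k ≤ gCnt nums r 0) :
    ∃ w ∈ nums, w ≤ r ∧ k ≤ gCnt nums w 0 ∧ ∀ x ∈ nums, x ≤ r → x ≤ w := by
  have hvf : v ∈ nums.filter (fun x => decide (x ≤ r)) := by
    simp [List.mem_filter, hv, hvr]
  obtain ⟨w, hw⟩ : ∃ w, PySem.List.max? (nums.filter (fun x => decide (x ≤ r))) (fun x => x) = some w := by
    cases h : PySem.List.max? (nums.filter (fun x => decide (x ≤ r))) (fun x => x) with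
    | none =>
        rw [PySem.List.max?_eq_none_iff] at h
        rw [h] at hvf
        simp at hvf
    | some w => exact ⟨w, rfl⟩
  have hwmem := PySem.List.max?_mem hw
  rw [List.mem_filter] at hwmem
  have hwr : w ≤ r := by simpa using hwmem.2
  have hwmax : ∀ y ∈ nums, y ≤ r → y ≤ w := by
    intro y hy hyr
    have := PySem.List.max?_isMax hw y (by simp [List.mem_filter, hy, hyr])
    simpa using this
  refine ⟨w, hwmem.1, hwr, ?_, hwmax⟩
  have hcongr : gCnt nums w 0 = gCnt nums r 0 := by
    apply gCnt_congr
    intro x hx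
    exact ⟨fun h => le_trans h hwr, fun h => hwmax x hx h⟩
  rw [hcongr]
  exact hF

-- ===== VERDICT (by name: the statement is the Claim_ definition above) =====
theorem minCapability_spec : Claim_equal_minCapability := by
  intro nums k _hdom hpre
  unfold Pre_minCapability at hpre
  unfold Spec_minCapability
  -- bridge: solveA is the greedy feasibility test
  have hP : ∀ x : Int, solveA nums k x = true ↔ k ≤ gCnt nums x 0 := by
    intro x
    rw [solveA_eq]
    simp
  -- ===== B side =====
  obtain ⟨mn, hmn⟩ : ∃ mn, PySem.List.min? nums (fun x => x) = some mn := by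
    cases h : PySem.List.min? nums (fun x => x) with
    | none => exact absurd ((PySem.List.min?_eq_none_iff nums (fun x => x)).mp h) hpre
    | some mn => exact ⟨mn, rfl⟩
  obtain ⟨mx, hmx⟩ : ∃ mx, PySem.List.max? nums (fun x => x) = some mx := by
    cases h : PySem.List.max? nums (fun x => x) with
    | none => exact absurd ((PySem.List.max?_eq_none_iff nums (fun x => x)).mp h) hpre
    | some mx => exact ⟨mx, rfl⟩
  have hBdef : minCapability_alt nums k = bLoop nums k mn mx := by
    unfold minCapability_alt
    rw [hmn, hmx]
  have hmnmem : mn ∈ nums := PySem.List.min?_mem hmn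
  have hmxmem : mx ∈ nums := PySem.List.max?_mem hmx
  have hmnmin : ∀ y ∈ nums, mn ≤ y := fun y hy => PySem.List.min?_isMin hmn y hy
  have hmxmax : ∀ y ∈ nums, y ≤ mx := fun y hy => PySem.List.max?_isMax hmx y hy
  obtain ⟨hb1, hb2, hb3, hb4⟩ := bLoop_spec nums k mn mx (hmnmin mx hmxmem)
  -- ===== A side =====
  simp only [minCapability]
  set vals := PySem.List.sorted (PySem.Set.ofList nums) (fun x => x) false with hv
  have hvmem : ∀ x, x ∈ vals ↔ x ∈ nums := by
    intro x
    rw [hv, PySem.List.mem_sorted, PySem.Set.mem_ofList]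
  have hvlt : ∀ (p q : Nat) (hp : p < vals.length) (hq : q < vals.length), p < q →
      vals[p] < vals[q] := by
    have hpw := PySem.List.sorted_ofList_pairwise_lt (xs := nums)
    rw [← hv] at hpw
    intro p q hp hq hpq
    exact List.pairwise_iff_getElem.mp hpw p q hp hq hpq
  have hvle : ∀ (p q : Nat) (hp : p < vals.length) (hq : q < vals.length), p ≤ q →
      vals[p] ≤ vals[q] := by
    intro p q hp hq hpq
    rcases Nat.eq_or_lt_of_le hpq with h | h
    · subst h; exact le_refl _
    · exact le_of_lt (hvlt p q hp hq h)
  have hvne : vals ≠ [] := by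
    intro h
    have := (hvmem mn).mpr hmnmem
    rw [h] at this
    simp at this
  have hlen1 : 1 ≤ vals.length := List.length_pos_of_ne_nil hvne
  obtain ⟨ha1, ha2, ha3, ha4, ha5, ha6⟩ :=
    aLoop_spec nums k vals 0 ((vals.length : Int) - 1) (by omega)
  set lr := aLoop nums k vals 0 ((vals.length : Int) - 1) with hlr
  have hlN : lr.1 = ((lr.1.toNat : Nat) : Int) := by omega
  have hrN : lr.2 = ((lr.2.toNat : Nat) : Int) := by omega
  have hlNlt : lr.1.toNat < vals.length := by omega
  have hrNlt : lr.2.toNat < vals.length := by omega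
  have hgl : PySem.List.pyGetD vals lr.1 0 = vals[lr.1.toNat] :=
    PySem.List.pyGetD_eq_getElem vals 0 ha1 (by omega)
  have hgr : PySem.List.pyGetD vals lr.2 0 = vals[lr.2.toNat] :=
    PySem.List.pyGetD_eq_getElem vals 0 (by omega) (by omega)
  -- vals[len-1] = mx
  have hlast : vals[vals.length - 1]'(by omega) = mx := by
    obtain ⟨q, hq, hqe⟩ := List.getElem_of_mem ((hvmem mx).mpr hmxmem)
    have h1 : vals[q] ≤ vals[vals.length - 1]'(by omega) := hvle q _ hq (by omega) (by omega)
    have h2 : vals[vals.length - 1]'(by omega) ≤ mx :=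
      hmxmax _ ((hvmem _).mp (List.getElem_mem (by omega)))
    rw [hqe] at h1
    omega
  by_cases hFmx : k ≤ gCnt nums mx 0
  · -- some capability is feasible: both sides return the least feasible element of nums
    have hChB : minCapability_alt nums k ∈ nums ∧ k ≤ gCnt nums (minCapability_alt nums k) 0 ∧
        ∀ v ∈ nums, v < minCapability_alt nums k → ¬ k ≤ gCnt nums v 0 := by
      rw [hBdef]
      set r := bLoop nums k mn mx with hr
      have hFr : k ≤ gCnt nums r 0 := by
        rcases hb4 with h | h
        · exact h
        · rw [h]; exact hFmx
      have hrmem : r ∈ nums := by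
        by_contra hnot
        obtain ⟨w, hwmem, hwr, hwF, _⟩ := feas_elem_of_feas nums k r mn hmnmem hb1 hFr
        have hwlt : w < r := lt_of_le_of_ne hwr (fun h => hnot (h ▸ hwmem))
        exact hb3 w (hmnmin w hwmem) hwlt hwF
      exact ⟨hrmem, hFr, fun v hv hvr => hb3 v (hmnmin v hv) hvr⟩
    have hChA : (if solveA nums k (PySem.List.pyGetD vals lr.1 0) = true
          then PySem.List.pyGetD vals lr.1 0 else PySem.List.pyGetD vals lr.2 0) ∈ nums ∧
        k ≤ gCnt nums (if solveA nums k (PySem.List.pyGetD vals lr.1 0) = true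
          then PySem.List.pyGetD vals lr.1 0 else PySem.List.pyGetD vals lr.2 0) 0 ∧
        ∀ v ∈ nums, v < (if solveA nums k (PySem.List.pyGetD vals lr.1 0) = true
          then PySem.List.pyGetD vals lr.1 0 else PySem.List.pyGetD vals lr.2 0) →
          ¬ k ≤ gCnt nums v 0 := by
      rcases hsl : solveA nums k (PySem.List.pyGetD vals lr.1 0) with h0 | h1
      · -- left index infeasible: the answer is vals[rN]
        simp only [Bool.false_eq_true, if_false]
        rw [hgr]
        have hnl : ¬ k ≤ gCnt nums (vals[lr.1.toNat]) 0 := by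
          rw [hgl] at hsl
          intro hc
          rw [(hP _).mpr hc] at hsl
          cases hsl
        have hFr : k ≤ gCnt nums (vals[lr.2.toNat]) 0 := by
          rcases ha6 with h | h
          · have hidx : vals[lr.2.toNat] = vals[vals.length - 1]'(by omega) := by
              congr 1
              omega
            rw [hidx, hlast]
            exact hFmx
          · rw [hgr] at h
            exact (hP _).mp h
        refine ⟨(hvmem _).mp (List.getElem_mem hrNlt), hFr, ?_⟩
        intro v hvmem' hvlt' hFv
        obtain ⟨q, hq, hqe⟩ := List.getElem_of_mem ((hvmem v).mpr hvmem')
        have hqr : q < lr.2.toNat := by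
          by_contra hge
          have := hvle lr.2.toNat q hrNlt hq (by omega)
          omega
        have hql : q ≤ lr.1.toNat := by omega
        have hle' : v ≤ vals[lr.1.toNat] := by
          rw [← hqe]
          exact hvle q lr.1.toNat hq hlNlt hql
        exact hnl (le_trans hFv (gCnt_mono nums hle' 0))
      · -- left index feasible: the invariant forces it to be index 0
        simp only [reduceIte]
        rw [hgl]
        have hl0 : lr.1.toNat = 0 := by
          rcases ha5 with h | h
          · omega
          · rw [h] at hsl
            cases hsl
        refine ⟨(hvmem _).mp (List.getElem_mem hlNlt), ?_, ?_⟩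
        · rw [hgl] at hsl
          exact (hP _).mp hsl
        · intro v hvmem' hvlt' hFv
          obtain ⟨q, hq, hqe⟩ := List.getElem_of_mem ((hvmem v).mpr hvmem')
          have : vals[lr.1.toNat] ≤ vals[q] := hvle lr.1.toNat q hlNlt hq (by omega)
          omega
    exact feas_unique nums k _ _ hChA hChB
  · -- nothing is feasible: both sides return mx
    have hrmx : minCapability_alt nums k = mx := by
      rw [hBdef]
      rcases hb4 with h | h
      · exact absurd (le_trans h (gCnt_mono nums hb2 0)) hFmx
      · exact h
    have hnone : ∀ (j : Nat) (hj : j < vals.length), ¬ (k ≤ gCnt nums (vals[j]) 0) := by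
      intro j hj hFj
      have hm : vals[j] ∈ nums := (hvmem _).mp (List.getElem_mem hj)
      exact hFmx (le_trans hFj (gCnt_mono nums (hmxmax _ hm) 0))
    have hsl : solveA nums k (PySem.List.pyGetD vals lr.1 0) = false := by
      rw [hgl]
      rcases h : solveA nums k (vals[lr.1.toNat]) with h0 | h1
      · rfl
      · exact absurd ((hP _).mp h) (hnone _ hlNlt)
    rw [hsl]
    simp only [Bool.false_eq_true, if_false]
    rw [hgr, hrmx]
    -- r' must be len-1 (else P r' would hold)
    rcases ha6 with h | h
    · rw [← hlast]
      congr 1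
      omega
    · rw [hgr] at h
      exact absurd ((hP _).mp h) (hnone _ hrNlt)
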